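-- pv_equiv track=rewrite | github.com/Kakoedlinnoeslovo/TextRelevance | Scorer.py | GetPairCount
-- ===== SOURCE A (Python) =====
-- def GetPairCount(w1, w2, positions1, positions2):
--     count_row = 0
--     count_inverse = 0
--     count_skip2 = 0
--     for p1 in positions1:
--         if (p1+1) in positions2:
--             count_row += 1
--         if (p1-1) in positions2:
--             count_inverse += 1
--         if (p1+2) in positions2:
--             count_skip2 += 1
--     return count_row, count_inverse, count_skip2
-- ===== SOURCE B (Python) =====
-- def GetPairCount(w1, w2, positions1, positions2):
--     # Reversed traversal: loop over positions2 (deduped on the fly) and, for each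
--     # candidate q, add how many times its required partner occurs in positions1.
--     freq = {}
--     for p in positions1:
--         freq[p] = freq.get(p, 0) + 1
--     count_row = 0
--     count_inverse = 0
--     count_skip2 = 0
--     seen = set()
--     for q in positions2:
--         if q in seen:
--             continue
--         seen.add(q)
--         count_row += freq.get(q - 1, 0)
--         count_inverse += freq.get(q + 1, 0)
--         count_skip2 += freq.get(q - 2, 0)
--     return count_row, count_inverse, count_skip2
-- ===== Notes on version B (the rewrite author's own statement) =====
-- stated objective: faster
-- what changed: Inverts the traversal: instead of scanning positions1 and testing three shifted memberships in positions2 per element, B builds a frequency table of positions1 once and then loops over positions2 (skipping duplicates with a seen-set), accumulating for each distinct q the multiplicities of its partners q-1, q+1, q-2 from the table.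
import Mathlib
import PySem

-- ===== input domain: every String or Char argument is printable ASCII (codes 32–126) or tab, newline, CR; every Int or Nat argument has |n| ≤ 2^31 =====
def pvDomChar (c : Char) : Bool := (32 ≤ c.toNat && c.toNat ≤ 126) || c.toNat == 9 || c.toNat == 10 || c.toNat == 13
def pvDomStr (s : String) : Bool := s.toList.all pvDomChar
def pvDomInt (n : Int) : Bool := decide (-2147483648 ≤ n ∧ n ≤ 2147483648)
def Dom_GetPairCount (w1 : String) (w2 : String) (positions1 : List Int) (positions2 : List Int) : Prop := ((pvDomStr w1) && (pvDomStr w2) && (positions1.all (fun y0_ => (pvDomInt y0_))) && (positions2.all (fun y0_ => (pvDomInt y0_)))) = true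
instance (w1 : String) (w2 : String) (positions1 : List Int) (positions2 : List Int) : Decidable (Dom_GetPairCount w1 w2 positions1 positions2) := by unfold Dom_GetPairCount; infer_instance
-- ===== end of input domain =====

-- B inverts the traversal: it builds a frequency table of positions1 once, then loops over positions2 (skipping duplicates) adding the multiplicities of each q's partners q-1, q+1, q-2.
-- ===== PORT A =====
def GetPairCount (w1 : String) (w2 : String) (positions1 : List Int) (positions2 : List Int) : Int × Int × Int :=
  positions1.foldl
    (fun st p1 =>
      (if (p1 + 1) ∈ positions2 then st.1 + 1 else st.1,
       if (p1 - 1) ∈ positions2 then st.2.1 + 1 else st.2.1,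
       if (p1 + 2) ∈ positions2 then st.2.2 + 1 else st.2.2))
    (0, 0, 0)

-- ===== PORT B =====
def GetPairCount_alt (w1 : String) (w2 : String) (positions1 : List Int) (positions2 : List Int) : Int × Int × Int :=
  let freq : PySem.Dict Int Int :=
    positions1.foldl (fun d p => d.insert p (d.getD p 0 + 1)) PySem.Dict.empty
  let st :=
    positions2.foldl
      (fun (st : PySem.Set Int × Int × Int × Int) q =>
        if q ∈ st.1 then st
        else (PySem.Set.add st.1 q,
              st.2.1 + freq.getD (q - 1) 0,
              st.2.2.1 + freq.getD (q + 1) 0,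
              st.2.2.2 + freq.getD (q - 2) 0))
      (PySem.Set.empty, 0, 0, 0)
  (st.2.1, st.2.2.1, st.2.2.2)

-- ===== PRECONDITION & SPEC =====
def Spec_GetPairCount (w1 : String) (w2 : String) (positions1 : List Int) (positions2 : List Int) (out : Int × Int × Int) : Prop := out = GetPairCount_alt w1 w2 positions1 positions2
instance (w1 : String) (w2 : String) (positions1 : List Int) (positions2 : List Int) (out : Int × Int × Int) : Decidable (Spec_GetPairCount w1 w2 positions1 positions2 out) := by unfold Spec_GetPairCount; infer_instance

-- ===== CLAIM =====
def Claim_equal_GetPairCount : Prop := ∀ (w1 : String) (w2 : String) (positions1 : List Int) (positions2 : List Int), Dom_GetPairCount w1 w2 positions1 positions2 → Spec_GetPairCount w1 w2 positions1 positions2 (GetPairCount w1 w2 positions1 positions2)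

-- ===== LEMMAS AND PROOFS =====

-- A's fold computes the three element-wise counts over positions1
theorem A_loop (l2 : List Int) (l1 : List Int) (a b c : Int) :
    l1.foldl
      (fun st p1 =>
        (if (p1 + 1) ∈ l2 then st.1 + 1 else st.1,
         if (p1 - 1) ∈ l2 then st.2.1 + 1 else st.2.1,
         if (p1 + 2) ∈ l2 then st.2.2 + 1 else st.2.2))
      (a, b, c)
    = (a + (l1.countP (fun x => decide ((x + 1) ∈ l2)) : Int),
       b + (l1.countP (fun x => decide ((x - 1) ∈ l2)) : Int),
       c + (l1.countP (fun x => decide ((x + 2) ∈ l2)) : Int)) := by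
  induction l1 generalizing a b c with
  | nil => simp
  | cons x t ih =>
    simp only [List.foldl_cons, List.countP_cons, ih, Prod.mk.injEq]
    refine ⟨?_, ?_, ?_⟩
    · by_cases h : (x + 1) ∈ l2 <;> simp [h] <;> push_cast <;> ring
    · by_cases h : (x - 1) ∈ l2 <;> simp [h] <;> push_cast <;> ring
    · by_cases h : (x + 2) ∈ l2 <;> simp [h] <;> push_cast <;> ring

-- B's dedup-fold over l2 accumulates each f over the distinct new elements of l2
theorem B_loop (f1 f2 f3 : Int → Int) (l2 : List Int) (s : PySem.Set Int) (a b c : Int) :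
    (l2.foldl
      (fun (st : PySem.Set Int × Int × Int × Int) q =>
        if q ∈ st.1 then st
        else (PySem.Set.add st.1 q, st.2.1 + f1 q, st.2.2.1 + f2 q, st.2.2.2 + f3 q))
      (s, a, b, c)).2
    = (a + ∑ q ∈ l2.toFinset \ s.toFinset, f1 q,
       b + ∑ q ∈ l2.toFinset \ s.toFinset, f2 q,
       c + ∑ q ∈ l2.toFinset \ s.toFinset, f3 q) := by
  induction l2 generalizing s a b c with
  | nil => simp
  | cons q t ih =>
    simp only [List.foldl_cons]
    by_cases hq : q ∈ s
    · rw [if_pos hq, ih]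
      have hset : (q :: t).toFinset \ s.toFinset = t.toFinset \ s.toFinset := by
        ext x
        simp only [List.toFinset_cons, Finset.mem_sdiff, Finset.mem_insert, List.mem_toFinset]
        constructor
        · rintro ⟨rfl | hx, hxs⟩
          · exact absurd hq hxs
          · exact ⟨hx, hxs⟩
        · exact fun h => ⟨Or.inr h.1, h.2⟩
      rw [hset]
    · rw [if_neg hq, ih]
      have hlist : PySem.Set.add s q = s ++ [q] := by
        simp [PySem.Set.add, hq]
      have hadd : (PySem.Set.add s q).toFinset = insert q s.toFinset := by
        rw [hlist]; ext x
        simp only [List.toFinset_append, Finset.mem_union, List.mem_toFinset,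
          List.toFinset_cons, Finset.mem_insert, List.toFinset_nil, Finset.notMem_empty,
          or_false]
        tauto
      have hset : ∀ f : Int → Int,
          ∑ x ∈ (q :: t).toFinset \ s.toFinset, f x
            = f q + ∑ x ∈ t.toFinset \ (PySem.Set.add s q).toFinset, f x := by
        intro f
        rw [hadd]
        have h1 : (q :: t).toFinset \ s.toFinset
            = insert q ((t.toFinset \ s.toFinset).erase q) := by
          ext x; simp [Finset.mem_sdiff, Finset.mem_erase]
          constructor
          · rintro ⟨rfl | hx, hxs⟩
            · left; rfl
            · by_cases hxq : x = q
              · left; exact hxq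
              · right; exact ⟨hxq, hx, hxs⟩
          · rintro (rfl | ⟨hxq, hx, hxs⟩)
            · exact ⟨Or.inl rfl, hq⟩
            · exact ⟨Or.inr hx, hxs⟩
        have h2 : t.toFinset \ insert q s.toFinset
            = (t.toFinset \ s.toFinset).erase q := by
          ext x; simp [Finset.mem_sdiff, Finset.mem_erase]; tauto
        rw [h1, Finset.sum_insert (Finset.notMem_erase q _), h2]
      rw [hset f1, hset f2, hset f3]
      ring_nf

-- counting l1-elements with partner x+d in l2 equals summing multiplicities of q-d over distinct q of l2
theorem count_bridge (d : Int) (l2 : List Int) (l1 : List Int) :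
    (l1.countP (fun x => decide ((x + d) ∈ l2)) : Int)
      = ∑ q ∈ l2.toFinset, (l1.count (q - d) : Int) := by
  induction l1 with
  | nil => simp
  | cons x t ih =>
    simp only [List.countP_cons, List.count_cons]
    push_cast
    rw [Finset.sum_add_distrib, ← ih]
    congr 1
    have hrw : ∀ q : Int, ((x == q - d) : Bool) = decide (q = x + d) := by
      intro q
      by_cases h : q = x + d
      · simp [h]
      · simp [h]; omega
    simp only [hrw, decide_eq_true_eq]
    rw [Finset.sum_ite_eq' l2.toFinset (x + d) (fun _ => (1 : Int))]
    simp [List.mem_toFinset]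

-- ===== VERDICT =====
theorem GetPairCount_spec : Claim_equal_GetPairCount := by
  intro w1 w2 l1 l2 _
  unfold Spec_GetPairCount GetPairCount GetPairCount_alt
  dsimp only
  rw [A_loop, B_loop]
  have hfreq : ∀ v : Int,
      (l1.foldl (fun d p => d.insert p (d.getD p 0 + 1)) PySem.Dict.empty).getD v 0
        = (l1.count v : Int) := by
    intro v
    rw [PySem.Dict.foldl_insert_getD_add_one_eq_counter, PySem.Dict.getD_counter]
  have hempty : ((PySem.Set.empty : PySem.Set Int)).toFinset = ∅ := rfl
  rw [hempty]
  simp only [Finset.sdiff_empty, hfreq, zero_add]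
  have cbm : (l1.countP (fun x => decide ((x - 1) ∈ l2)) : Int)
      = ∑ q ∈ l2.toFinset, (l1.count (q + 1) : Int) := by
    have h := count_bridge (-1) l2 l1
    simpa [← sub_eq_add_neg, sub_neg_eq_add] using h
  rw [count_bridge 1 l2 l1, cbm, count_bridge 2 l2 l1]
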